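-- pv_equiv track=rewrite | github.com/ZAmirX/HCR2-Team-Tracker | SSQueryBot.py | generate_out
-- ===== SOURCE A (Python) =====
-- def generate_out(t_data, char_lim=2000):
--     """Create a separated output based on a max character limit and present it nicely for Discord."""
--     # Start out with an empty string in the output list and a counter for which position the string we're using is in the list
--     out_list = [""]
--     message_num = 0
--     for row in t_data:
--         # Create an individual string for each row
--         row_string = ""
--         # Only use 2 line breaks when it's not the first row in a message
--         if out_list[message_num] != "":
--             row_string += "\n\n"
--         # Position number and team name in code block
--         row_string += "`#" + row[0] + "  " + row[1] + "`  "
--         # Put a '+' sign in front of cup difference when positive, otherwise negatives can remain as they are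
--         if not row[2].startswith('-'):
--             row_string += "+"
--         # Format the time in BOLD and timezone in brackets
--         row_string += row[2] + "  **" + row[4] + " - " + row[5] + "** (" + row[6] + ")"
--         # Check that data exists for possibly played teams and add it on a new line.
--         # Format the description in italics and team names in code block
--         if row[3] != "-":
--             row_string += "\n*Possibly played:* `" + row[3] + "`"
--
--         # Check that adding this row to the current message doesn't cause it to go over the character limit
--         if len(out_list[message_num]) + len(row_string) < char_lim:
--             # Add the row to the message if it doesn't go over the limit
--             out_list[message_num] += row_string
--         # Otherwise, create a new message in the list, increase the message counter and add the row to the new message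
--         else:
--             out_list.append("")
--             message_num += 1
--             out_list[message_num] += row_string
--
--     # Output the final list of messages
--     return out_list
-- ===== SOURCE B (Python) =====
-- def generate_out(t_data, char_lim=2000):
--     """Create a separated output based on a max character limit and present it nicely for Discord."""
--     # Pass 1: format every row; the leading separator depends only on the row index.
--     formatted = []
--     for i, row in enumerate(t_data):
--         sep = "" if i == 0 else "\n\n"
--         sign = "" if row[2].startswith('-') else "+"
--         extra = "" if row[3] == "-" else "\n*Possibly played:* `" + row[3] + "`"
--         formatted.append(sep + "`#" + row[0] + "  " + row[1] + "`  " + sign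
--                          + row[2] + "  **" + row[4] + " - " + row[5] + "** (" + row[6] + ")" + extra)
--     # Pass 2: greedy packing under the character limit, working on the last message.
--     out_list = [""]
--     for s in formatted:
--         if len(out_list[-1]) + len(s) < char_lim:
--             out_list[-1] += s
--         else:
--             out_list.append(s)
--     return out_list
-- ===== Notes on version B (the rewrite author's own statement) =====
-- stated objective: alternative
-- what changed: B splits A's single stateful loop into two passes: a formatting pass where the row separator is derived from the enumerate index instead of inspecting the message being built, and a separate greedy packing pass over the pre-formatted strings that only ever touches the last message.
import Mathlib
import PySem

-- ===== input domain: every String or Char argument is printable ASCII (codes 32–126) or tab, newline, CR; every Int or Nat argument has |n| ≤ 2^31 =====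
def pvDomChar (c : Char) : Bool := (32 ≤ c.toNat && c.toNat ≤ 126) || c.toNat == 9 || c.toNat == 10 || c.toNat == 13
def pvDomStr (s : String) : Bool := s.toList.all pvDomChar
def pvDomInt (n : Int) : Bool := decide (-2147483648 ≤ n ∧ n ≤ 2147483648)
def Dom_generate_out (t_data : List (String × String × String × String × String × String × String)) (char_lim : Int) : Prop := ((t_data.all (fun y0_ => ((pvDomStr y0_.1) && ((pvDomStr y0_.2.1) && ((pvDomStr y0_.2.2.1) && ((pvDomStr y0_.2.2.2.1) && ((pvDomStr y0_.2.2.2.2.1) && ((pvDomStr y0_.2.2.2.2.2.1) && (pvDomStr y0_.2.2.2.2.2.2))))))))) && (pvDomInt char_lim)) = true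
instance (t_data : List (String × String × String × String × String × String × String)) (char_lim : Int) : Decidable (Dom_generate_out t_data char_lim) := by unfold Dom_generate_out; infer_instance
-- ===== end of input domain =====

-- B replaces A's single stateful loop by a formatting pass (separator from the row index)
-- followed by a greedy packing pass over the pre-formatted strings (alternative decomposition).


-- ===== PORT A =====
-- A's loop body: builds row_string incrementally (the separator decided by inspecting the
-- current message), then either extends out_list[message_num] or appends a new message.
-- Strings are carried as List Char (PySem's string representation); out_list[message_num]
-- is List.getD / List.set.
def generate_out_stepA (char_lim : Int)
    (st : List (List Char) × Nat)
    (row : String × String × String × String × String × String × String) :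
    List (List Char) × Nat :=
  let out_list := st.1
  let n := st.2
  let rs : List Char := if out_list.getD n [] ≠ [] then ['\n', '\n'] else []
  let rs := rs ++ ['`', '#'] ++ row.1.toList ++ [' ', ' '] ++ row.2.1.toList ++ ['`', ' ', ' ']
  let rs := if ¬ (PySem.Chars.startswith row.2.2.1.toList ['-']) then rs ++ ['+'] else rs
  let rs := rs ++ row.2.2.1.toList ++ [' ', ' ', '*', '*'] ++ row.2.2.2.2.1.toList
              ++ [' ', '-', ' '] ++ row.2.2.2.2.2.1.toList ++ ['*', '*', ' ', '(']
              ++ row.2.2.2.2.2.2.toList ++ [')']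
  let rs := if row.2.2.2.1.toList ≠ ['-'] then
              rs ++ "\n*Possibly played:* `".toList ++ row.2.2.2.1.toList ++ ['`']
            else rs
  if ((out_list.getD n []).length : Int) + (rs.length : Int) < char_lim then
    (out_list.set n (out_list.getD n [] ++ rs), n)
  else
    let out' := out_list ++ [[]]
    (out'.set (n + 1) (out'.getD (n + 1) [] ++ rs), n + 1)

def generate_out (t_data : List (String × String × String × String × String × String × String)) (char_lim : Int) : List String :=
  ((t_data.foldl (generate_out_stepA char_lim) ([[]], 0)).1).map String.ofList

-- ===== PORT B =====
-- B's core row format (no separator): sign and "possibly played" parts chosen up front.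
def pvB_core (row : String × String × String × String × String × String × String) : List Char :=
  let sign : List Char := if PySem.Chars.startswith row.2.2.1.toList ['-'] then [] else ['+']
  let extra : List Char := if row.2.2.2.1.toList = ['-'] then []
                           else "\n*Possibly played:* `".toList ++ row.2.2.2.1.toList ++ ['`']
  ['`', '#'] ++ row.1.toList ++ [' ', ' '] ++ row.2.1.toList ++ ['`', ' ', ' ']
    ++ sign ++ row.2.2.1.toList ++ [' ', ' ', '*', '*'] ++ row.2.2.2.2.1.toList
    ++ [' ', '-', ' '] ++ row.2.2.2.2.2.1.toList ++ ['*', '*', ' ', '(']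
    ++ row.2.2.2.2.2.2.toList ++ [')'] ++ extra

-- B's pass 1: the separator comes from the enumerate index.
def pvB_fmt (t_data : List (String × String × String × String × String × String × String)) : List (List Char) :=
  (PySem.List.enumerate t_data).map
    (fun p => (if p.1 = 0 then [] else ['\n', '\n']) ++ pvB_core p.2)

-- B's pass 2: greedy packing, always working on the last message (out_list[-1]).
def pvB_pack (char_lim : Int) (acc : List (List Char)) (s : List Char) : List (List Char) :=
  let last := acc.getLastD []
  if (last.length : Int) + (s.length : Int) < char_lim then acc.dropLast ++ [last ++ s]
  else acc ++ [s]

def generate_out_alt (t_data : List (String × String × String × String × String × String × String)) (char_lim : Int) : List String :=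
  ((pvB_fmt t_data).foldl (pvB_pack char_lim) [[]]).map String.ofList

-- ===== PRECONDITION & SPEC =====
def Spec_generate_out (t_data : List (String × String × String × String × String × String × String)) (char_lim : Int) (out : List String) : Prop := out = generate_out_alt t_data char_lim
instance (t_data : List (String × String × String × String × String × String × String)) (char_lim : Int) (out : List String) : Decidable (Spec_generate_out t_data char_lim out) := by unfold Spec_generate_out; infer_instance

-- ===== CLAIM (what is proved, stated in full; the proofs are below) =====
def Claim_equal_generate_out : Prop := ∀ (t_data : List (String × String × String × String × String × String × String)) (char_lim : Int), Dom_generate_out t_data char_lim → Spec_generate_out t_data char_lim (generate_out t_data char_lim)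

-- ===== LEMMAS AND PROOFS =====

-- pvB_core is never empty (every row string starts with a backtick).
theorem pvB_core_ne_nil (row : String × String × String × String × String × String × String) :
    pvB_core row ≠ [] := by
  simp [pvB_core]

-- indexing / updating a list at its last position (index = length of the front part)
theorem pv_getD_concat {α : Type} (l : List α) (a d : α) : (l ++ [a]).getD l.length d = a := by
  induction l with
  | nil => rfl
  | cons x t ih => simp only [List.cons_append, List.length_cons, List.getD_cons_succ]; exact ih

theorem pv_set_concat {α : Type} (l : List α) (a x : α) :
    (l ++ [a]).set l.length x = l ++ [x] := by
  induction l with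
  | nil => rfl
  | cons y t ih => simp [ih]

-- pvB_pack on a state written as front ++ [last].
theorem pv_pack_concat (cl : Int) (front : List (List Char)) (last s : List Char) :
    pvB_pack cl (front ++ [last]) s =
      if (last.length : Int) + (s.length : Int) < cl then front ++ [last ++ s]
      else (front ++ [last]) ++ [s] := by
  simp [pvB_pack]

-- A's incrementally built row_string is the separator followed by pvB_core.
theorem pv_row_eq (row : String × String × String × String × String × String × String)
    (sep : List Char) :
    (if row.2.2.2.1.toList ≠ ['-'] then
        ((if ¬ (PySem.Chars.startswith row.2.2.1.toList ['-']) then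
            sep ++ ['`', '#'] ++ row.1.toList ++ [' ', ' '] ++ row.2.1.toList ++ ['`', ' ', ' ']
              ++ ['+']
          else
            sep ++ ['`', '#'] ++ row.1.toList ++ [' ', ' '] ++ row.2.1.toList ++ ['`', ' ', ' '])
          ++ row.2.2.1.toList ++ [' ', ' ', '*', '*'] ++ row.2.2.2.2.1.toList
          ++ [' ', '-', ' '] ++ row.2.2.2.2.2.1.toList ++ ['*', '*', ' ', '(']
          ++ row.2.2.2.2.2.2.toList ++ [')'])
          ++ "\n*Possibly played:* `".toList ++ row.2.2.2.1.toList ++ ['`']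
      else
        ((if ¬ (PySem.Chars.startswith row.2.2.1.toList ['-']) then
            sep ++ ['`', '#'] ++ row.1.toList ++ [' ', ' '] ++ row.2.1.toList ++ ['`', ' ', ' ']
              ++ ['+']
          else
            sep ++ ['`', '#'] ++ row.1.toList ++ [' ', ' '] ++ row.2.1.toList ++ ['`', ' ', ' '])
          ++ row.2.2.1.toList ++ [' ', ' ', '*', '*'] ++ row.2.2.2.2.1.toList
          ++ [' ', '-', ' '] ++ row.2.2.2.2.2.1.toList ++ ['*', '*', ' ', '(']
          ++ row.2.2.2.2.2.2.toList ++ [')']))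
    = sep ++ pvB_core row := by
  simp only [pvB_core]
  split_ifs <;> simp_all [List.append_assoc]

-- One step of A's loop, on a state written as front ++ [last] with message_num = front.length,
-- equals one pvB_pack step on the separator-prefixed row string.
theorem pv_stepA_concat (cl : Int) (front : List (List Char)) (last : List Char)
    (row : String × String × String × String × String × String × String) :
    generate_out_stepA cl (front ++ [last], front.length) row =
      (pvB_pack cl (front ++ [last]) ((if last ≠ [] then ['\n', '\n'] else []) ++ pvB_core row),
       if (last.length : Int) + ((((if last ≠ [] then ['\n', '\n'] else []) ++ pvB_core row)).length : Int) < cl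
       then front.length else front.length + 1) := by
  have hget : (front ++ [last]).getD front.length [] = last := pv_getD_concat front last []
  have hget2 : ((front ++ [last]) ++ [([] : List Char)]).getD (front.length + 1) [] = [] := by
    have h := pv_getD_concat (front ++ [last]) ([] : List Char) []
    rwa [List.length_append, List.length_singleton] at h
  have hset2 : ∀ x, ((front ++ [last]) ++ [([] : List Char)]).set (front.length + 1) x
      = (front ++ [last]) ++ [x] := by
    intro x
    have h := pv_set_concat (front ++ [last]) ([] : List Char) x
    rwa [List.length_append, List.length_singleton] at h
  dsimp only [generate_out_stepA]
  rw [hget, hget2]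
  rw [pv_row_eq row (if last ≠ [] then ['\n', '\n'] else [])]
  rw [pv_pack_concat, hset2, pv_set_concat]
  split_ifs <;> rfl

-- A's loop from an aligned state equals B's packing pass over "\n\n"-prefixed row strings,
-- as long as the current message is non-empty (true after the first row).
theorem pv_loop (cl : Int)
    (t : List (String × String × String × String × String × String × String)) :
    ∀ (front : List (List Char)) (last : List Char), last ≠ [] →
      (t.foldl (generate_out_stepA cl) (front ++ [last], front.length)).1 =
        (t.map (fun row => ['\n', '\n'] ++ pvB_core row)).foldl (pvB_pack cl) (front ++ [last]) := by
  induction t with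
  | nil => intro front last _; simp
  | cons r rest ih =>
    intro front last h
    simp only [List.foldl_cons, List.map_cons]
    rw [pv_stepA_concat, if_pos h, pv_pack_concat]
    by_cases hc : (last.length : Int) + (((['\n', '\n'] : List Char) ++ pvB_core r).length : Int) < cl
    · simp only [if_pos hc]
      exact ih front (last ++ (['\n', '\n'] ++ pvB_core r)) (by simp [h])
    · simp only [if_neg hc]
      have h2 := ih (front ++ [last]) (['\n', '\n'] ++ pvB_core r) (by simp)
      simpa using h2

-- B's formatting pass with a start index ≥ 1 always takes the "\n\n" separator.
theorem pv_fmt_shift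
    (t : List (String × String × String × String × String × String × String)) :
    ∀ s : Int, 1 ≤ s →
      (PySem.List.enumerate t s).map
          (fun p => (if p.1 = 0 then [] else ['\n', '\n']) ++ pvB_core p.2)
        = t.map (fun row => ['\n', '\n'] ++ pvB_core row) := by
  induction t with
  | nil => intro s _; simp [PySem.List.enumerate_nil]
  | cons r rest ih =>
    intro s hs
    rw [PySem.List.enumerate_cons]
    simp only [List.map_cons]
    rw [ih (s + 1) (by omega)]
    simp [show ¬ (s = 0) by omega]

-- ===== VERDICT (by name: the statement is the Claim_ definition above) =====
theorem generate_out_spec : Claim_equal_generate_out := by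
  intro t cl _
  unfold Spec_generate_out
  cases t with
  | nil => rfl
  | cons r rest =>
    unfold generate_out generate_out_alt pvB_fmt
    congr 1
    rw [PySem.List.enumerate_cons, List.foldl_cons,
        show (([([] : List Char)], 0) : List (List Char) × Nat)
          = (([] : List (List Char)) ++ [[]], ([] : List (List Char)).length) from rfl,
        pv_stepA_concat cl [] [] r]
    rw [show (if ([] : List Char) ≠ [] then (['\n', '\n'] : List Char) else []) = [] by simp]
    simp only [List.map_cons, List.foldl_cons, zero_add, List.nil_append, List.length_nil,
      Nat.cast_zero, reduceIte]
    rw [pv_fmt_shift rest 1 le_rfl]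
    have hpk : pvB_pack cl [[]] (pvB_core r)
        = if (((pvB_core r).length : Int) < cl) then [pvB_core r] else [[], pvB_core r] := by
      by_cases hc : (((pvB_core r).length : Int) < cl) <;> simp [pvB_pack, hc]
    rw [hpk]
    by_cases hc : (((pvB_core r).length : Int) < cl)
    · simp only [if_pos hc]
      exact pv_loop cl rest [] (pvB_core r) (pvB_core_ne_nil r)
    · simp only [if_neg hc]
      exact pv_loop cl rest [[]] (pvB_core r) (pvB_core_ne_nil r)
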